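-- pv_equiv track=rewrite | github.com/simka275/Advent-of-Code | 2020/day17.py | elapse_4d
-- ===== SOURCE A (Python) =====
-- def valid_pos_4d(space, coord):
--     x,y,z,w = coord
--     # w
--     if w < 0 or w >= len(space):
--         return False
--     # z
--     if z < 0 or z >= len(space[w]):
--         return False
--     # y
--     if y < 0 or y >= len(space[w][z]):
--         return False
--     # x
--     if x < 0 or x >= len(space[w][z][y]):
--         return False
--     return True
--
-- def count_active_neighbors_4d(space, coord):
--     res = 0
--     x,y,z,w = coord
--     for dw in [-1,0,1]:
--         for dz in [-1,0,1]:
--             for dy in [-1,0,1]: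
--                 for dx in [-1,0,1]:
--                     xx,yy,zz,ww = x+dx,y+dy,z+dz,w+dw
--                     if (xx,yy,zz,ww) == (x,y,z,w) or not valid_pos_4d(space, (xx,yy,zz,ww)):
--                         continue
--                     elif space[ww][zz][yy][xx] == "#":
--                         res += 1
--     return res
--
-- def tick_4d(space):
--     new_space = []
--     new_w_range = len(space)+2
--     new_z_range = len(space[0])+2
--     new_y_range = len(space[0][0])+2
--     new_x_range = len(space[0][0][0])+2
--     for w in range(new_w_range):
--         glorf = [] # well known name of the 4th dimension
--         for z in range(new_z_range):
--             depth = []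
--             for y in range(new_y_range):
--                 row = []
--                 for x in range(new_x_range):
--                     xx,yy,zz,ww = x-1,y-1,z-1,w-1
--                     active_neighbors = count_active_neighbors_4d(space, (xx,yy,zz,ww))
--                     if valid_pos_4d(space, (xx,yy,zz,ww)) and space[ww][zz][yy][xx] == "#" and active_neighbors == 2:
--                         row.append("#")
--                     elif active_neighbors == 3:
--                         row.append("#")
--                     else:
--                         row.append(".")
--                 depth.append(row)
--             glorf.append(depth)
--         new_space.append(glorf)
--     return new_space
--
-- def elapse_4d(space, ticks):
--     res = 0
--     for _ in range(ticks):
--         space = tick_4d(space)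
--
--     for w in range(len(space)):
--         for z in range(len(space[w])):
--             for y in range(len(space[w][z])):
--                 for x in range(len(space[w][z][y])):
--                     if space[w][z][y][x] == "#":
--                         res += 1
--     return res
-- ===== SOURCE B (Python) =====
-- def elapse_4d(space, ticks):
--     # Sparse simulation: keep only the set of active cells (in the original,
--     # never re-based coordinates); each tick, tally neighbor counts around
--     # active cells in a dict and apply the rule to the tallied cells that lie
--     # inside the frame (which grows by one layer per tick) -- no dense sweep,
--     # no grid is ever rebuilt.  The answer is the set's size.
--     active = {(x, y, z, w)
--               for w, g in enumerate(space)
--               for z, d in enumerate(g)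
--               for y, r in enumerate(d)
--               for x, c in enumerate(r) if c == "#"}
--     deltas = [(dx, dy, dz, dw)
--               for dw in (-1, 0, 1) for dz in (-1, 0, 1)
--               for dy in (-1, 0, 1) for dx in (-1, 0, 1)
--               if (dx, dy, dz, dw) != (0, 0, 0, 0)]
--     for t in range(ticks):
--         cnt = {}
--         for (x, y, z, w) in active:
--             for (dx, dy, dz, dw) in deltas:
--                 p = (x + dx, y + dy, z + dz, w + dw)
--                 cnt[p] = cnt.get(p, 0) + 1
--         f = t + 1
--         active = {(x, y, z, w) for (x, y, z, w), n in cnt.items()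
--                   if -f <= x < len(space[0][0][0]) + f
--                   and -f <= y < len(space[0][0]) + f
--                   and -f <= z < len(space[0]) + f
--                   and -f <= w < len(space) + f
--                   and (n == 3 or (n == 2 and (x, y, z, w) in active))}
--     return len(active)
-- ===== Notes on version B (the rewrite author's own statement) =====
-- stated objective: faster
-- what changed: B simulates the automaton sparsely: it keeps a set of active coordinates and each tick tallies neighbor counts in one dict pass over the active cells only, applying the birth/survival rule to the tallied cells inside the growing frame, instead of A's dense sweep that rebuilds the full nested-list grid and probes 81 neighbors at every cell of the re-grown box.
import Mathlib
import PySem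

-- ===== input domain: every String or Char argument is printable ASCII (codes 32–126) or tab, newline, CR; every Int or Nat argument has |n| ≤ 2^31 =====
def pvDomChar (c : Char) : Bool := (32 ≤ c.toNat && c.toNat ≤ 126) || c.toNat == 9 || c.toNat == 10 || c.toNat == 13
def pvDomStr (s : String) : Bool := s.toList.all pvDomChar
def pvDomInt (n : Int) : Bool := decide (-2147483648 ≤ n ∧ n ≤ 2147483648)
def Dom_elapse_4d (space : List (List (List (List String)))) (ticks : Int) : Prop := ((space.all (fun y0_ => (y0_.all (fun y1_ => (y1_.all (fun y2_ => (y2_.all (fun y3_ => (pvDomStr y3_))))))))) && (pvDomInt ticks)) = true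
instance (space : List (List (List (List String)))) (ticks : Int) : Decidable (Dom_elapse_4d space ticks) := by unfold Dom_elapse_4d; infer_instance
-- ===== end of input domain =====

-- B simulates sparsely: a set of active coordinates and, per tick, one dict tally of neighbor
-- counts around active cells (rule applied to tallied cells inside the growing frame), instead
-- of A's dense sweep that rebuilds the whole nested-list grid and probes 81 cells everywhere.

-- ===== PORT A =====
def validPos4d (space : List (List (List (List String)))) (x y z w : Int) : Bool :=
  if w < 0 ∨ PySem.List.len space ≤ w then false
  else if z < 0 ∨ PySem.List.len (PySem.List.pyGetD space w []) ≤ z then false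
  else if y < 0 ∨ PySem.List.len (PySem.List.pyGetD (PySem.List.pyGetD space w []) z []) ≤ y then false
  else if x < 0 ∨ PySem.List.len (PySem.List.pyGetD (PySem.List.pyGetD (PySem.List.pyGetD space w []) z []) y []) ≤ x then false
  else true

def cell4d (space : List (List (List (List String)))) (x y z w : Int) : String :=
  PySem.List.pyGetD (PySem.List.pyGetD (PySem.List.pyGetD (PySem.List.pyGetD space w []) z []) y []) x ""

def countActiveNeighbors4d (space : List (List (List (List String)))) (x y z w : Int) : Int :=
  ([-1, 0, 1] : List Int).foldl (fun res dw =>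
    ([-1, 0, 1] : List Int).foldl (fun res dz =>
      ([-1, 0, 1] : List Int).foldl (fun res dy =>
        ([-1, 0, 1] : List Int).foldl (fun res dx =>
          if (x + dx, y + dy, z + dz, w + dw) = (x, y, z, w) ∨ ¬ (validPos4d space (x + dx) (y + dy) (z + dz) (w + dw) = true) then res
          else if cell4d space (x + dx) (y + dy) (z + dz) (w + dw) = "#" then res + 1
          else res) res) res) res) 0

def tick4d (space : List (List (List (List String)))) : List (List (List (List String))) :=
  let newWRange := PySem.List.len space + 2
  let newZRange := PySem.List.len (PySem.List.pyGetD space 0 []) + 2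
  let newYRange := PySem.List.len (PySem.List.pyGetD (PySem.List.pyGetD space 0 []) 0 []) + 2
  let newXRange := PySem.List.len (PySem.List.pyGetD (PySem.List.pyGetD (PySem.List.pyGetD space 0 []) 0 []) 0 []) + 2
  (PySem.List.pyRange 0 newWRange).map (fun w =>
    (PySem.List.pyRange 0 newZRange).map (fun z =>
      (PySem.List.pyRange 0 newYRange).map (fun y =>
        (PySem.List.pyRange 0 newXRange).map (fun x =>
          let an := countActiveNeighbors4d space (x - 1) (y - 1) (z - 1) (w - 1)
          if validPos4d space (x - 1) (y - 1) (z - 1) (w - 1) = true ∧ cell4d space (x - 1) (y - 1) (z - 1) (w - 1) = "#" ∧ an = 2 then "#"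
          else if an = 3 then "#"
          else "."))))

def elapse_4d (space : List (List (List (List String)))) (ticks : Int) : Int :=
  let fin := (PySem.List.pyRange 0 ticks).foldl (fun sp _ => tick4d sp) space
  (PySem.List.pyRange 0 (PySem.List.len fin)).foldl (fun res w =>
    (PySem.List.pyRange 0 (PySem.List.len (PySem.List.pyGetD fin w []))).foldl (fun res z =>
      (PySem.List.pyRange 0 (PySem.List.len (PySem.List.pyGetD (PySem.List.pyGetD fin w []) z []))).foldl (fun res y =>
        (PySem.List.pyRange 0 (PySem.List.len (PySem.List.pyGetD (PySem.List.pyGetD (PySem.List.pyGetD fin w []) z []) y []))).foldl (fun res x =>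
          if PySem.List.pyGetD (PySem.List.pyGetD (PySem.List.pyGetD (PySem.List.pyGetD fin w []) z []) y []) x "" = "#" then res + 1
          else res) res) res) res) 0

-- ===== PORT B =====
-- the set comprehension collecting the coordinates of '#' cells, as (x, y, z, w)
def enumActive (space : List (List (List (List String)))) : List (Int × Int × Int × Int) :=
  (PySem.List.enumerate space).flatMap (fun wg =>
    (PySem.List.enumerate wg.2).flatMap (fun zd =>
      (PySem.List.enumerate zd.2).flatMap (fun yr =>
        (PySem.List.enumerate yr.2).filterMap (fun xc =>
          if xc.2 = "#" then some (xc.1, yr.1, zd.1, wg.1) else none))))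

def initActive (space : List (List (List (List String)))) : PySem.Set (Int × Int × Int × Int) :=
  PySem.Set.ofList (enumActive space)

-- the 80 neighbour offsets, generated in the comprehension's order with the centre filtered out
def deltas4 : List (Int × Int × Int × Int) :=
  ([-1, 0, 1] : List Int).flatMap (fun dw =>
    ([-1, 0, 1] : List Int).flatMap (fun dz =>
      ([-1, 0, 1] : List Int).flatMap (fun dy =>
        ([-1, 0, 1] : List Int).filterMap (fun dx =>
          if (dx, dy, dz, dw) = ((0 : Int), (0 : Int), (0 : Int), (0 : Int)) then none
          else some (dx, dy, dz, dw)))))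

def nAdd (a d : Int × Int × Int × Int) : Int × Int × Int × Int :=
  (a.1 + d.1, a.2.1 + d.2.1, a.2.2.1 + d.2.2.1, a.2.2.2 + d.2.2.2)

-- cnt[p] = cnt.get(p, 0) + 1 over every neighbor p of every active cell
def tally (active : PySem.Set (Int × Int × Int × Int)) : PySem.Dict (Int × Int × Int × Int) Int :=
  active.foldl (fun cnt a =>
    deltas4.foldl (fun cnt d =>
      cnt.insert (nAdd a d) (cnt.getD (nAdd a d) 0 + 1)) cnt) PySem.Dict.empty

-- one tick: rule applied to the tallied cells that lie inside the grown frame (f = t + 1)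
def stepActive (space : List (List (List (List String)))) (t : Int)
    (active : PySem.Set (Int × Int × Int × Int)) : PySem.Set (Int × Int × Int × Int) :=
  PySem.Set.ofList ((tally active).items.filterMap (fun pn =>
    if (-(t + 1) ≤ pn.1.1 ∧ pn.1.1 < PySem.List.len (PySem.List.pyGetD (PySem.List.pyGetD (PySem.List.pyGetD space 0 []) 0 []) 0 []) + (t + 1)) ∧
       (-(t + 1) ≤ pn.1.2.1 ∧ pn.1.2.1 < PySem.List.len (PySem.List.pyGetD (PySem.List.pyGetD space 0 []) 0 []) + (t + 1)) ∧
       (-(t + 1) ≤ pn.1.2.2.1 ∧ pn.1.2.2.1 < PySem.List.len (PySem.List.pyGetD space 0 []) + (t + 1)) ∧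
       (-(t + 1) ≤ pn.1.2.2.2 ∧ pn.1.2.2.2 < PySem.List.len space + (t + 1)) ∧
       (pn.2 = 3 ∨ (pn.2 = 2 ∧ pn.1 ∈ active))
    then some pn.1 else none))

def elapse_4d_alt (space : List (List (List (List String)))) (ticks : Int) : Int :=
  PySem.Set.len ((PySem.List.pyRange 0 ticks).foldl
    (fun active t => stepActive space t active) (initActive space))

-- ===== PRECONDITION & SPEC =====
-- Pre_ excludes only the inputs on which the Python A raises IndexError (ticks ≥ 1 with an empty
-- space / first cube / first plane, whose lengths the first tick reads).
def Pre_elapse_4d (space : List (List (List (List String)))) (ticks : Int) : Prop :=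
  ticks ≤ 0 ∨ (space ≠ [] ∧ PySem.List.pyGetD space 0 [] ≠ [] ∧
               PySem.List.pyGetD (PySem.List.pyGetD space 0 []) 0 [] ≠ [])
instance (space : List (List (List (List String)))) (ticks : Int) : Decidable (Pre_elapse_4d space ticks) := by unfold Pre_elapse_4d; infer_instance

def pvWitness_elapse_4d : List (List (List (List String))) × Int := ([[[["#", "#", "#"]]]], 1)

def Spec_elapse_4d (space : List (List (List (List String)))) (ticks : Int) (out : Int) : Prop := out = elapse_4d_alt space ticks
instance (space : List (List (List (List String)))) (ticks : Int) (out : Int) : Decidable (Spec_elapse_4d space ticks out) := by unfold Spec_elapse_4d; infer_instance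

-- ===== CLAIM (what is proved, stated in full; the proofs are below) =====
def Claim_equal_elapse_4d : Prop := ∀ (space : List (List (List (List String)))) (ticks : Int), Dom_elapse_4d space ticks → Pre_elapse_4d space ticks → Spec_elapse_4d space ticks (elapse_4d space ticks)

-- ===== LEMMAS AND PROOFS =====

theorem validPos4d_iff (space : List (List (List (List String)))) (x y z w : Int) :
    validPos4d space x y z w = true ↔
      (0 ≤ w ∧ w < PySem.List.len space ∧
       0 ≤ z ∧ z < PySem.List.len (PySem.List.pyGetD space w []) ∧
       0 ≤ y ∧ y < PySem.List.len (PySem.List.pyGetD (PySem.List.pyGetD space w []) z []) ∧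
       0 ≤ x ∧ x < PySem.List.len (PySem.List.pyGetD (PySem.List.pyGetD (PySem.List.pyGetD space w []) z []) y [])) := by
  simp only [validPos4d, PySem.List.len_eq]
  split_ifs <;> simp <;> omega

theorem mem_enumActive (space : List (List (List (List String)))) (x y z w : Int) :
    (x, y, z, w) ∈ enumActive space ↔
      (validPos4d space x y z w = true ∧ cell4d space x y z w = "#") := by
  simp only [enumActive, List.mem_flatMap, List.mem_filterMap, PySem.List.mem_enumerate_iff,
    Option.ite_none_right_eq_some, Option.some.injEq, validPos4d_iff, cell4d, PySem.List.len_eq]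
  constructor
  · rintro ⟨wg, ⟨kw, hkw, rfl⟩, zd, ⟨kz, hkz, rfl⟩, yr, ⟨ky, hky, rfl⟩, xc, ⟨kx, hkx, rfl⟩, hc, heq⟩
    obtain ⟨hx, hy, hz, hw⟩ : x = (kx : Int) ∧ y = (ky : Int) ∧ z = (kz : Int) ∧ w = (kw : Int) := by
      simpa using heq.symm
    subst hx; subst hy; subst hz; subst hw
    simp only [zero_add] at *
    rw [PySem.List.pyGetD_eq_getElem space [] (by omega) (by exact_mod_cast hkw)]
    simp only [Int.toNat_natCast]
    rw [PySem.List.pyGetD_eq_getElem _ [] (by omega) (by exact_mod_cast hkz)]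
    simp only [Int.toNat_natCast]
    rw [PySem.List.pyGetD_eq_getElem _ [] (by omega) (by exact_mod_cast hky)]
    simp only [Int.toNat_natCast]
    rw [PySem.List.pyGetD_eq_getElem _ "" (by omega) (by exact_mod_cast hkx)]
    simp only [Int.toNat_natCast]
    refine ⟨⟨by omega, by exact_mod_cast hkw, by omega, by exact_mod_cast hkz, by omega, by exact_mod_cast hky, by omega, by exact_mod_cast hkx⟩, ?_⟩
    simpa using hc
  · rintro ⟨⟨h0w, h1w, h0z, h1z, h0y, h1y, h0x, h1x⟩, hc⟩
    obtain ⟨kw, rfl⟩ := Int.eq_ofNat_of_zero_le h0w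
    obtain ⟨kz, rfl⟩ := Int.eq_ofNat_of_zero_le h0z
    obtain ⟨ky, rfl⟩ := Int.eq_ofNat_of_zero_le h0y
    obtain ⟨kx, rfl⟩ := Int.eq_ofNat_of_zero_le h0x
    have hbw : kw < space.length := by exact_mod_cast h1w
    rw [PySem.List.pyGetD_eq_getElem space [] (by omega) h1w] at h1z h1y h1x hc
    simp only [Int.toNat_natCast] at h1z h1y h1x hc
    have hbz : kz < space[kw].length := by exact_mod_cast h1z
    rw [PySem.List.pyGetD_eq_getElem _ [] (by omega) h1z] at h1y h1x hc
    simp only [Int.toNat_natCast] at h1y h1x hc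
    have hby : ky < space[kw][kz].length := by exact_mod_cast h1y
    rw [PySem.List.pyGetD_eq_getElem _ [] (by omega) h1y] at h1x hc
    simp only [Int.toNat_natCast] at h1x hc
    have hbx : kx < space[kw][kz][ky].length := by exact_mod_cast h1x
    rw [PySem.List.pyGetD_eq_getElem _ "" (by omega) h1x] at hc
    simp only [Int.toNat_natCast] at hc
    exact ⟨(↑kw, space[kw]), ⟨kw, hbw, by simp⟩,
           (↑kz, space[kw][kz]), ⟨kz, hbz, by simp⟩,
           (↑ky, space[kw][kz][ky]), ⟨ky, hby, by simp⟩,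
           (↑kx, space[kw][kz][ky][kx]), ⟨kx, hbx, by simp⟩, by simpa using hc, rfl⟩

theorem nodup_flatMap_key {α β : Type} (l : List α) (k : α → Int) (f : α → List β) (tag : β → Int)
    (hl : l.Pairwise (fun p q => k p < k q))
    (htag : ∀ p ∈ l, ∀ b ∈ f p, tag b = k p)
    (hf : ∀ p ∈ l, (f p).Nodup) : (l.flatMap f).Nodup := by
  rw [List.nodup_flatMap]
  refine ⟨hf, ?_⟩
  refine List.Pairwise.imp_of_mem (fun {p q} hp hq hlt => ?_) hl
  intro b hbp hbq
  have h1 := htag p hp b hbp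
  have h2 := htag q hq b hbq
  omega

theorem nodup_enumActive (space : List (List (List (List String)))) :
    (enumActive space).Nodup := by
  unfold enumActive
  refine nodup_flatMap_key _ Prod.fst _ (fun b => b.2.2.2)
    (PySem.List.pairwise_lt_enumerate _ _) ?_ ?_
  · rintro p hp b hb
    simp only [List.mem_flatMap, List.mem_filterMap] at hb
    obtain ⟨zd, _, yr, _, xc, _, hb⟩ := hb
    by_cases h : xc.2 = "#" <;> simp [h] at hb
    simp [← hb]
  · intro p hp
    refine nodup_flatMap_key _ Prod.fst _ (fun b => b.2.2.1)
      (PySem.List.pairwise_lt_enumerate _ _) ?_ ?_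
    · rintro q hq b hb
      simp only [List.mem_flatMap, List.mem_filterMap] at hb
      obtain ⟨yr, _, xc, _, hb⟩ := hb
      by_cases h : xc.2 = "#" <;> simp [h] at hb
      simp [← hb]
    · intro q hq
      refine nodup_flatMap_key _ Prod.fst _ (fun b => b.2.1)
        (PySem.List.pairwise_lt_enumerate _ _) ?_ ?_
      · rintro r hr b hb
        simp only [List.mem_filterMap] at hb
        obtain ⟨xc, _, hb⟩ := hb
        by_cases h : xc.2 = "#" <;> simp [h] at hb
        simp [← hb]
      · intro r hr
        refine List.Nodup.filterMap (fun a a' b hba hba' => ?_) ?_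
        · by_cases h : a.2 = "#" <;> simp [h] at hba
          by_cases h' : a'.2 = "#" <;> simp [h'] at hba'
          have e1 : a.1 = b.1 := by rw [← hba]
          have e2 : a'.1 = b.1 := by rw [← hba']
          exact Prod.ext (e1.trans e2.symm) (h.trans h'.symm)
        · exact (PySem.List.pairwise_lt_enumerate _ _).imp (fun h heq => by rw [heq] at h; omega)

-- proof-side neighbour count of a coordinate in a set
def countNb (active : PySem.Set (Int × Int × Int × Int)) (x y z w : Int) : Int :=
  (deltas4.map (fun d => if (x + d.1, y + d.2.1, z + d.2.2.1, w + d.2.2.2) ∈ active then (1 : Int) else 0)).sum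

-- generic loop-shape helpers
theorem foldl_plus {α : Type} (l : List α) (a : Int) (F : Int → α → Int) (S : α → Int)
    (h : ∀ res d, F res d = res + S d) : l.foldl F a = a + (l.map S).sum := by
  have hF : F = fun res d => res + S d := by funext r d; rw [h]
  rw [hF, PySem.List.foldl_add]

theorem sum_map_flatMap {α β : Type} (l : List α) (f : α → List β) (g : β → Int) :
    ((l.flatMap f).map g).sum = (l.map (fun a => ((f a).map g).sum)).sum := by
  rw [List.map_flatMap, List.flatMap_def, List.sum_flatten, List.map_map]
  rfl

theorem sum_map_filterMap_if {α β : Type} (l : List α) (p : α → Prop) [DecidablePred p]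
    (f : α → β) (g : β → Int) :
    ((l.filterMap (fun a => if p a then none else some (f a))).map g).sum
      = (l.map (fun a => if p a then 0 else g (f a))).sum := by
  induction l with
  | nil => rfl
  | cons a l ih =>
    by_cases h : p a <;> simp [h, ih]

theorem sum_map_congr {α : Type} (l : List α) (F G : α → Int) (h : ∀ a, F a = G a) :
    (l.map F).sum = (l.map G).sum := by
  have : F = G := funext h
  rw [this]

-- countNb of the set equals A's neighbour count on the t-translated grid
theorem count_eq (grid : List (List (List (List String)))) (t : Int)
    (active : PySem.Set (Int × Int × Int × Int))
    (hmem : ∀ x y z w : Int, (x, y, z, w) ∈ active ↔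
      (validPos4d grid (x + t) (y + t) (z + t) (w + t) = true ∧ cell4d grid (x + t) (y + t) (z + t) (w + t) = "#"))
    (x y z w : Int) :
    countNb active x y z w = countActiveNeighbors4d grid (x + t) (y + t) (z + t) (w + t) := by
  have hA : countActiveNeighbors4d grid (x + t) (y + t) (z + t) (w + t) =
      (([-1, 0, 1] : List Int).map (fun dw =>
        (([-1, 0, 1] : List Int).map (fun dz =>
          (([-1, 0, 1] : List Int).map (fun dy =>
            (([-1, 0, 1] : List Int).map (fun dx =>
              if (x + t + dx, y + t + dy, z + t + dz, w + t + dw) = (x + t, y + t, z + t, w + t) ∨ ¬ (validPos4d grid (x + t + dx) (y + t + dy) (z + t + dz) (w + t + dw) = true) then (0 : Int)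
              else if cell4d grid (x + t + dx) (y + t + dy) (z + t + dz) (w + t + dw) = "#" then 1
              else 0)).sum)).sum)).sum)).sum := by
    unfold countActiveNeighbors4d
    have L1 : ∀ dw dz dy (res : Int),
        ([-1, 0, 1] : List Int).foldl (fun res dx =>
          if (x + t + dx, y + t + dy, z + t + dz, w + t + dw) = (x + t, y + t, z + t, w + t) ∨ ¬ (validPos4d grid (x + t + dx) (y + t + dy) (z + t + dz) (w + t + dw) = true) then res
          else if cell4d grid (x + t + dx) (y + t + dy) (z + t + dz) (w + t + dw) = "#" then res + 1
          else res) res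
        = res + (([-1, 0, 1] : List Int).map (fun dx =>
            if (x + t + dx, y + t + dy, z + t + dz, w + t + dw) = (x + t, y + t, z + t, w + t) ∨ ¬ (validPos4d grid (x + t + dx) (y + t + dy) (z + t + dz) (w + t + dw) = true) then (0 : Int)
            else if cell4d grid (x + t + dx) (y + t + dy) (z + t + dz) (w + t + dw) = "#" then 1
            else 0)).sum :=
      fun dw dz dy res => foldl_plus _ _ _ _ (fun res dx => by split_ifs <;> ring)
    have L2 : ∀ dw dz (res : Int), _ = res + _ := fun dw dz res =>
      foldl_plus ([-1, 0, 1] : List Int) res _ _ (fun res dy => L1 dw dz dy res)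
    have L3 : ∀ dw (res : Int), _ = res + _ := fun dw res =>
      foldl_plus ([-1, 0, 1] : List Int) res _ _ (fun res dz => L2 dw dz res)
    have L4 : ∀ (res : Int), _ = res + _ := fun res =>
      foldl_plus ([-1, 0, 1] : List Int) res _ _ (fun res dw => L3 dw res)
    exact (L4 0).trans (by ring)
  have hB : countNb active x y z w =
      (([-1, 0, 1] : List Int).map (fun dw =>
        (([-1, 0, 1] : List Int).map (fun dz =>
          (([-1, 0, 1] : List Int).map (fun dy =>
            (([-1, 0, 1] : List Int).map (fun dx =>
              if (dx, dy, dz, dw) = ((0 : Int), (0 : Int), (0 : Int), (0 : Int)) then (0 : Int)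
              else if (x + dx, y + dy, z + dz, w + dw) ∈ active then 1
              else 0)).sum)).sum)).sum)).sum := by
    unfold countNb deltas4
    rw [sum_map_flatMap]
    refine sum_map_congr _ _ _ (fun dw => ?_)
    rw [sum_map_flatMap]
    refine sum_map_congr _ _ _ (fun dz => ?_)
    rw [sum_map_flatMap]
    refine sum_map_congr _ _ _ (fun dy => ?_)
    rw [sum_map_filterMap_if]
  rw [hA, hB]
  refine sum_map_congr _ _ _ (fun dw => ?_)
  refine sum_map_congr _ _ _ (fun dz => ?_)
  refine sum_map_congr _ _ _ (fun dy => ?_)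
  refine sum_map_congr _ _ _ (fun dx => ?_)
  have e1 : x + t + dx = (x + dx) + t := by ring
  have e2 : y + t + dy = (y + dy) + t := by ring
  have e3 : z + t + dz = (z + dz) + t := by ring
  have e4 : w + t + dw = (w + dw) + t := by ring
  rw [e1, e2, e3, e4]
  have hc : ((dx, dy, dz, dw) = ((0 : Int), (0 : Int), (0 : Int), (0 : Int))) ↔
      ((x + dx + t, y + dy + t, z + dz + t, w + dw + t) = (x + t, y + t, z + t, w + t)) := by
    simp only [Prod.ext_iff]; constructor <;> intro h <;> refine ⟨?_, ?_, ?_, ?_⟩ <;> omega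
  simp only [hmem (x + dx) (y + dy) (z + dz) (w + dw)]
  split_ifs <;> tauto

theorem len_nonneg {α : Type} (xs : List α) : 0 ≤ PySem.List.len xs := by
  rw [PySem.List.len_eq]; exact Int.natCast_nonneg _

theorem len_map_pyRange {α : Type} (f : Int → α) (n : Int) (h : 0 ≤ n) :
    PySem.List.len ((PySem.List.pyRange 0 n).map f) = n := by
  rw [PySem.List.len_eq, List.length_map, PySem.List.length_pyRange_one]; omega

theorem cell_tick (space : List (List (List (List String)))) (x y z w : Int)
    (hw0 : 0 ≤ w) (hw1 : w < PySem.List.len space + 2)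
    (hz0 : 0 ≤ z) (hz1 : z < PySem.List.len (PySem.List.pyGetD space 0 []) + 2)
    (hy0 : 0 ≤ y) (hy1 : y < PySem.List.len (PySem.List.pyGetD (PySem.List.pyGetD space 0 []) 0 []) + 2)
    (hx0 : 0 ≤ x) (hx1 : x < PySem.List.len (PySem.List.pyGetD (PySem.List.pyGetD (PySem.List.pyGetD space 0 []) 0 []) 0 []) + 2) :
    cell4d (tick4d space) x y z w =
      (if validPos4d space (x - 1) (y - 1) (z - 1) (w - 1) = true ∧ cell4d space (x - 1) (y - 1) (z - 1) (w - 1) = "#" ∧ countActiveNeighbors4d space (x - 1) (y - 1) (z - 1) (w - 1) = 2 then "#"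
       else if countActiveNeighbors4d space (x - 1) (y - 1) (z - 1) (w - 1) = 3 then "#"
       else ".") := by
  unfold cell4d
  simp only [tick4d]
  rw [PySem.List.pyGetD_map_pyRange_of_nonneg _ _ _ _ hw0 hw1]
  rw [PySem.List.pyGetD_map_pyRange_of_nonneg _ _ _ _ hz0 hz1]
  rw [PySem.List.pyGetD_map_pyRange_of_nonneg _ _ _ _ hy0 hy1]
  rw [PySem.List.pyGetD_map_pyRange_of_nonneg _ _ _ _ hx0 hx1]
  rfl

theorem valid_tick (space : List (List (List (List String)))) (x y z w : Int) :
    validPos4d (tick4d space) x y z w = true ↔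
      (0 ≤ w ∧ w < PySem.List.len space + 2 ∧
       0 ≤ z ∧ z < PySem.List.len (PySem.List.pyGetD space 0 []) + 2 ∧
       0 ≤ y ∧ y < PySem.List.len (PySem.List.pyGetD (PySem.List.pyGetD space 0 []) 0 []) + 2 ∧
       0 ≤ x ∧ x < PySem.List.len (PySem.List.pyGetD (PySem.List.pyGetD (PySem.List.pyGetD space 0 []) 0 []) 0 []) + 2) := by
  rw [validPos4d_iff]
  have hW := len_nonneg space
  have hZ := len_nonneg (PySem.List.pyGetD space 0 [])
  have hY := len_nonneg (PySem.List.pyGetD (PySem.List.pyGetD space 0 []) 0 [])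
  have hX := len_nonneg (PySem.List.pyGetD (PySem.List.pyGetD (PySem.List.pyGetD space 0 []) 0 []) 0 [])
  have L1 : PySem.List.len (tick4d space) = PySem.List.len space + 2 := by
    simp only [tick4d]; rw [len_map_pyRange _ _ (by omega)]
  constructor
  · rintro ⟨h0w, h1w, h0z, h1z, h0y, h1y, h0x, h1x⟩
    rw [L1] at h1w
    simp only [tick4d] at h1z h1y h1x
    rw [PySem.List.pyGetD_map_pyRange_of_nonneg _ _ _ _ h0w h1w,
        len_map_pyRange _ _ (by omega)] at h1z
    rw [PySem.List.pyGetD_map_pyRange_of_nonneg _ _ _ _ h0w h1w,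
        PySem.List.pyGetD_map_pyRange_of_nonneg _ _ _ _ h0z h1z,
        len_map_pyRange _ _ (by omega)] at h1y
    rw [PySem.List.pyGetD_map_pyRange_of_nonneg _ _ _ _ h0w h1w,
        PySem.List.pyGetD_map_pyRange_of_nonneg _ _ _ _ h0z h1z,
        PySem.List.pyGetD_map_pyRange_of_nonneg _ _ _ _ h0y h1y,
        len_map_pyRange _ _ (by omega)] at h1x
    exact ⟨h0w, h1w, h0z, h1z, h0y, h1y, h0x, h1x⟩
  · rintro ⟨h0w, h1w, h0z, h1z, h0y, h1y, h0x, h1x⟩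
    refine ⟨h0w, by rw [L1]; exact h1w, h0z, ?_, h0y, ?_, h0x, ?_⟩
    · simp only [tick4d]
      rw [PySem.List.pyGetD_map_pyRange_of_nonneg _ _ _ _ h0w h1w,
          len_map_pyRange _ _ (by omega)]
      exact h1z
    · simp only [tick4d]
      rw [PySem.List.pyGetD_map_pyRange_of_nonneg _ _ _ _ h0w h1w,
          PySem.List.pyGetD_map_pyRange_of_nonneg _ _ _ _ h0z h1z,
          len_map_pyRange _ _ (by omega)]
      exact h1y
    · simp only [tick4d]
      rw [PySem.List.pyGetD_map_pyRange_of_nonneg _ _ _ _ h0w h1w,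
          PySem.List.pyGetD_map_pyRange_of_nonneg _ _ _ _ h0z h1z,
          PySem.List.pyGetD_map_pyRange_of_nonneg _ _ _ _ h0y h1y,
          len_map_pyRange _ _ (by omega)]
      exact h1x

theorem lens_tick (space : List (List (List (List String)))) :
    PySem.List.len (tick4d space) = PySem.List.len space + 2 ∧
    PySem.List.len (PySem.List.pyGetD (tick4d space) 0 []) = PySem.List.len (PySem.List.pyGetD space 0 []) + 2 ∧
    PySem.List.len (PySem.List.pyGetD (PySem.List.pyGetD (tick4d space) 0 []) 0 []) = PySem.List.len (PySem.List.pyGetD (PySem.List.pyGetD space 0 []) 0 []) + 2 ∧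
    PySem.List.len (PySem.List.pyGetD (PySem.List.pyGetD (PySem.List.pyGetD (tick4d space) 0 []) 0 []) 0 []) = PySem.List.len (PySem.List.pyGetD (PySem.List.pyGetD (PySem.List.pyGetD space 0 []) 0 []) 0 []) + 2 := by
  have hW := len_nonneg space
  have hZ := len_nonneg (PySem.List.pyGetD space 0 [])
  have hY := len_nonneg (PySem.List.pyGetD (PySem.List.pyGetD space 0 []) 0 [])
  have hX := len_nonneg (PySem.List.pyGetD (PySem.List.pyGetD (PySem.List.pyGetD space 0 []) 0 []) 0 [])
  refine ⟨?_, ?_, ?_, ?_⟩ <;> simp only [tick4d]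
  · rw [len_map_pyRange _ _ (by omega)]
  · rw [PySem.List.pyGetD_map_pyRange_of_nonneg _ _ _ _ (le_refl 0) (by omega),
        len_map_pyRange _ _ (by omega)]
  · rw [PySem.List.pyGetD_map_pyRange_of_nonneg _ _ _ _ (le_refl 0) (by omega),
        PySem.List.pyGetD_map_pyRange_of_nonneg _ _ _ _ (le_refl 0) (by omega),
        len_map_pyRange _ _ (by omega)]
  · rw [PySem.List.pyGetD_map_pyRange_of_nonneg _ _ _ _ (le_refl 0) (by omega),
        PySem.List.pyGetD_map_pyRange_of_nonneg _ _ _ _ (le_refl 0) (by omega),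
        PySem.List.pyGetD_map_pyRange_of_nonneg _ _ _ _ (le_refl 0) (by omega),
        len_map_pyRange _ _ (by omega)]

-- dims of tick4d^[k] space
theorem lens_iter (space : List (List (List (List String)))) : ∀ k : Nat,
    PySem.List.len (tick4d^[k] space) = PySem.List.len space + 2 * k ∧
    PySem.List.len (PySem.List.pyGetD (tick4d^[k] space) 0 []) = PySem.List.len (PySem.List.pyGetD space 0 []) + 2 * k ∧
    PySem.List.len (PySem.List.pyGetD (PySem.List.pyGetD (tick4d^[k] space) 0 []) 0 []) = PySem.List.len (PySem.List.pyGetD (PySem.List.pyGetD space 0 []) 0 []) + 2 * k ∧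
    PySem.List.len (PySem.List.pyGetD (PySem.List.pyGetD (PySem.List.pyGetD (tick4d^[k] space) 0 []) 0 []) 0 []) = PySem.List.len (PySem.List.pyGetD (PySem.List.pyGetD (PySem.List.pyGetD space 0 []) 0 []) 0 []) + 2 * k := by
  intro k
  induction k with
  | zero => simp
  | succ k ih =>
    obtain ⟨i1, i2, i3, i4⟩ := ih
    rw [Function.iterate_succ_apply']
    obtain ⟨t1, t2, t3, t4⟩ := lens_tick (tick4d^[k] space)
    refine ⟨?_, ?_, ?_, ?_⟩ <;> push_cast <;> omega

-- ===== counter characterisation =====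
def flatNb (active : PySem.Set (Int × Int × Int × Int)) : List (Int × Int × Int × Int) :=
  active.flatMap (fun a => deltas4.map (nAdd a))

theorem foldl_flatMap {α β γ : Type} (l : List α) (f : α → List β) (g : γ → β → γ) (init : γ) :
    (l.flatMap f).foldl g init = l.foldl (fun acc a => (f a).foldl g acc) init := by
  induction l generalizing init with
  | nil => rfl
  | cons a l ih => simp only [List.flatMap_cons, List.foldl_append, List.foldl_cons, ih]

theorem tally_eq_counter (active : PySem.Set (Int × Int × Int × Int)) :
    tally active = PySem.Dict.counter (flatNb active) := by
  rw [← PySem.Dict.foldl_insert_getD_add_one_eq_counter, flatNb, foldl_flatMap]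
  unfold tally
  have : (fun (acc : PySem.Dict (Int × Int × Int × Int) Int) a =>
      (deltas4.map (nAdd a)).foldl (fun d x => d.insert x (d.getD x 0 + 1)) acc)
      = (fun acc a => deltas4.foldl (fun cnt d => cnt.insert (nAdd a d) (cnt.getD (nAdd a d) 0 + 1)) acc) := by
    funext acc a
    rw [List.foldl_map]
  rw [this]

theorem mem_deltas4 (dx dy dz dw : Int) :
    (dx, dy, dz, dw) ∈ deltas4 ↔
      (-1 ≤ dx ∧ dx ≤ 1 ∧ -1 ≤ dy ∧ dy ≤ 1 ∧ -1 ≤ dz ∧ dz ≤ 1 ∧ -1 ≤ dw ∧ dw ≤ 1 ∧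
       ¬(dx = 0 ∧ dy = 0 ∧ dz = 0 ∧ dw = 0)) := by
  simp only [deltas4, List.mem_flatMap, List.mem_filterMap, Option.ite_none_left_eq_some,
    Option.some.injEq, Prod.mk.injEq, List.mem_cons, List.not_mem_nil, or_false]
  constructor
  · rintro ⟨dw', hw, dz', hz, dy', hy, dx', hx, hne, hex, hey, hez, hew⟩
    subst hex; subst hey; subst hez; subst hew
    omega
  · intro h
    exact ⟨dw, by omega, dz, by omega, dy, by omega, dx, by omega, by omega, rfl, rfl, rfl, rfl⟩

theorem nodup_deltas4 : deltas4.Nodup := by decide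

def nSub (c a : Int × Int × Int × Int) : Int × Int × Int × Int :=
  (c.1 - a.1, c.2.1 - a.2.1, c.2.2.1 - a.2.2.1, c.2.2.2 - a.2.2.2)

theorem count_map_nAdd (l : List (Int × Int × Int × Int)) (a c : Int × Int × Int × Int) :
    (l.map (nAdd a)).count c = l.count (nSub c a) := by
  induction l with
  | nil => rfl
  | cons d l ih =>
    simp only [List.map_cons, List.count_cons, ih]
    have hiff : (nAdd a d = c) ↔ (d = nSub c a) := by
      obtain ⟨d1, d2, d3, d4⟩ := d
      obtain ⟨a1, a2, a3, a4⟩ := a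
      obtain ⟨c1, c2, c3, c4⟩ := c
      simp only [nAdd, nSub, Prod.mk.injEq]
      constructor <;> intro h <;> refine ⟨by omega, by omega, by omega, by omega⟩
    have hb : (nAdd a d == c) = (d == nSub c a) := by
      rw [Bool.eq_iff_iff, beq_iff_eq, beq_iff_eq]; exact hiff
    rw [hb]

theorem count_nodup_list (l : List (Int × Int × Int × Int)) (hnd : l.Nodup)
    (c : Int × Int × Int × Int) : l.count c = if c ∈ l then 1 else 0 := by
  by_cases h : c ∈ l
  · rw [if_pos h]; exact List.count_eq_one_of_mem hnd h
  · rw [if_neg h]; exact List.count_eq_zero.mpr h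

theorem count_flatMap_list {α β : Type} [BEq β] (l : List α) (f : α → List β) (c : β) :
    (l.flatMap f).count c = (l.map (fun a => (f a).count c)).sum := by
  induction l with
  | nil => rfl
  | cons a l ih => simp [List.flatMap_cons, List.count_append, ih]

theorem sum_ite_nat {α : Type} (l : List α) (p : α → Prop) [DecidablePred p] :
    (l.map (fun a => if p a then (1 : Nat) else 0)).sum
      = (l.filter (fun a => decide (p a))).length := by
  induction l with
  | nil => rfl
  | cons a l ih => by_cases h : p a <;> simp [h, ih] <;> omega

theorem sum_ite_mem_length {α : Type} (l : List α) (p : α → Prop) [DecidablePred p] :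
    (l.map (fun a => if p a then (1 : Int) else 0)).sum
      = ((l.filter (fun a => decide (p a))).length : Int) := by
  induction l with
  | nil => rfl
  | cons a l ih => by_cases h : p a <;> simp [h, ih] <;> ring

-- the swap: tallied multiplicity of c = countNb of c
theorem count_flatNb (active : PySem.Set (Int × Int × Int × Int)) (hnd : active.Nodup)
    (x y z w : Int) :
    (((flatNb active).count (x, y, z, w) : Nat) : Int) = countNb active x y z w := by
  rw [flatNb, count_flatMap_list]
  have hmap : (fun a => ((deltas4.map (nAdd a)).count (x, y, z, w)))
      = fun a : Int × Int × Int × Int => if nSub (x, y, z, w) a ∈ deltas4 then (1 : Nat) else 0 := by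
    funext a
    rw [count_map_nAdd, count_nodup_list deltas4 nodup_deltas4]
  rw [hmap, sum_ite_nat, countNb, sum_ite_mem_length]
  -- both filtered lists are nodup and in bijection via d ↦ (x+d, …)
  have hperm : ((deltas4.filter (fun d => decide ((x + d.1, y + d.2.1, z + d.2.2.1, w + d.2.2.2) ∈ active))).map
        (fun d => (x + d.1, y + d.2.1, z + d.2.2.1, w + d.2.2.2))).Perm
      (active.filter (fun a => decide (nSub (x, y, z, w) a ∈ deltas4))) := by
    apply (List.perm_ext_iff_of_nodup ?_ ?_).mpr
    · intro m
      obtain ⟨m1, m2, m3, m4⟩ := m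
      simp only [List.mem_map, List.mem_filter, decide_eq_true_eq, Prod.mk.injEq]
      constructor
      · rintro ⟨d, ⟨hd, hm⟩, e1, e2, e3, e4⟩
        obtain ⟨d1, d2, d3, d4⟩ := d
        simp only at e1 e2 e3 e4
        subst e1; subst e2; subst e3; subst e4
        refine ⟨hm, ?_⟩
        have hs : nSub (x, y, z, w) (x + d1, y + d2, z + d3, w + d4) = (-d1, -d2, -d3, -d4) := by
          simp only [nSub, Prod.mk.injEq]; refine ⟨by omega, by omega, by omega, by omega⟩
        rw [hs, mem_deltas4]
        rw [mem_deltas4] at hd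
        omega
      · rintro ⟨hm, hd⟩
        rw [show nSub (x, y, z, w) (m1, m2, m3, m4) = (x - m1, y - m2, z - m3, w - m4) from rfl,
          mem_deltas4] at hd
        refine ⟨(m1 - x, m2 - y, m3 - z, m4 - w), ⟨?_, ?_⟩,
          by show x + (m1 - x) = m1; omega, by show y + (m2 - y) = m2; omega,
          by show z + (m3 - z) = m3; omega, by show w + (m4 - w) = m4; omega⟩
        · rw [mem_deltas4]; omega
        · have he : (x + (m1 - x), y + (m2 - y), z + (m3 - z), w + (m4 - w)) = (m1, m2, m3, m4) := by
            simp only [Prod.mk.injEq]; refine ⟨by omega, by omega, by omega, by omega⟩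
          rw [he]; exact hm
    · refine List.Nodup.map ?_ (List.Nodup.filter _ nodup_deltas4)
      intro d d' h
      obtain ⟨d1, d2, d3, d4⟩ := d
      obtain ⟨e1, e2, e3, e4⟩ := d'
      simp only [Prod.mk.injEq] at h ⊢
      omega
    · exact List.Nodup.filter _ hnd
  have hl := hperm.length_eq
  rw [List.length_map] at hl
  rw [← hl]

-- ===== step characterisation and invariant =====
theorem mem_stepActive (space : List (List (List (List String)))) (t : Int)
    (active : PySem.Set (Int × Int × Int × Int)) (hnd : active.Nodup) (x y z w : Int) :
    (x, y, z, w) ∈ stepActive space t active ↔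
      ((-(t + 1) ≤ x ∧ x < PySem.List.len (PySem.List.pyGetD (PySem.List.pyGetD (PySem.List.pyGetD space 0 []) 0 []) 0 []) + (t + 1)) ∧
       (-(t + 1) ≤ y ∧ y < PySem.List.len (PySem.List.pyGetD (PySem.List.pyGetD space 0 []) 0 []) + (t + 1)) ∧
       (-(t + 1) ≤ z ∧ z < PySem.List.len (PySem.List.pyGetD space 0 []) + (t + 1)) ∧
       (-(t + 1) ≤ w ∧ w < PySem.List.len space + (t + 1)) ∧
       (countNb active x y z w = 3 ∨ (countNb active x y z w = 2 ∧ (x, y, z, w) ∈ active))) := by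
  have hcnt := count_flatNb active hnd x y z w
  simp only [stepActive, PySem.Set.mem_ofList, List.mem_filterMap, tally_eq_counter,
    PySem.Dict.items_counter, List.mem_map, PySem.Set.mem_ofList,
    Option.ite_none_right_eq_some, Option.some.injEq]
  constructor
  · rintro ⟨pn, ⟨k, hk, rfl⟩, hcond, heq⟩
    subst heq
    obtain ⟨hbx, hby, hbz, hbw, hrule⟩ := hcond
    refine ⟨hbx, hby, hbz, hbw, ?_⟩
    rw [← hcnt]
    exact hrule
  · rintro ⟨hbx, hby, hbz, hbw, hrule⟩
    refine ⟨((x, y, z, w), (((flatNb active).count (x, y, z, w) : Nat) : Int)),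
      ⟨(x, y, z, w), ?_, rfl⟩, ⟨hbx, hby, hbz, hbw, by rw [hcnt]; exact hrule⟩, rfl⟩
    -- (x,y,z,w) occurs in the tallied list: its count is positive
    have hpos : 0 < (flatNb active).count (x, y, z, w) := by
      by_contra hle
      have h0 : (flatNb active).count (x, y, z, w) = 0 := by omega
      rw [h0] at hcnt
      rcases hrule with h | ⟨h, _⟩ <;> omega
    exact List.count_pos_iff.mp hpos

-- the simulation invariant after k ticks: active holds the '#' coordinates, translated back k steps
def Inv4 (space : List (List (List (List String)))) (k : Nat)
    (active : PySem.Set (Int × Int × Int × Int)) : Prop :=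
  active.Nodup ∧ ∀ x y z w : Int, (x, y, z, w) ∈ active ↔
    (validPos4d (tick4d^[k] space) (x + k) (y + k) (z + k) (w + k) = true ∧
     cell4d (tick4d^[k] space) (x + k) (y + k) (z + k) (w + k) = "#")

theorem inv_init (space : List (List (List (List String)))) : Inv4 space 0 (initActive space) := by
  refine ⟨PySem.Set.nodup_ofList _, fun x y z w => ?_⟩
  simp only [Function.iterate_zero_apply, Nat.cast_zero, add_zero]
  rw [initActive, PySem.Set.mem_ofList]
  exact mem_enumActive space x y z w


theorem inv_step (space : List (List (List (List String)))) (k : Nat)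
    (active : PySem.Set (Int × Int × Int × Int)) (h : Inv4 space k active) :
    Inv4 space (k + 1) (stepActive space (k : Int) active) := by
  obtain ⟨hnd, hmem⟩ := h
  obtain ⟨d1, d2, d3, d4⟩ := lens_iter space k
  refine ⟨PySem.Set.nodup_ofList _, fun x y z w => ?_⟩
  rw [mem_stepActive space (k : Int) active hnd x y z w]
  simp only [Function.iterate_succ_apply']
  rw [valid_tick, d1, d2, d3, d4]
  push_cast
  have hcnt := count_eq (tick4d^[k] space) (k : Int) active hmem x y z w
  have ex : x + ((k : Int) + 1) - 1 = x + (k : Int) := by ring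
  have ey : y + ((k : Int) + 1) - 1 = y + (k : Int) := by ring
  have ez : z + ((k : Int) + 1) - 1 = z + (k : Int) := by ring
  have ew : w + ((k : Int) + 1) - 1 = w + (k : Int) := by ring
  constructor
  · rintro ⟨hbx, hby, hbz, hbw, hrule⟩
    have hw1 : w + ((k : Int) + 1) < PySem.List.len (tick4d^[k] space) + 2 := by rw [d1]; omega
    have hz1 : z + ((k : Int) + 1) < PySem.List.len (PySem.List.pyGetD (tick4d^[k] space) 0 []) + 2 := by rw [d2]; omega
    have hy1 : y + ((k : Int) + 1) < PySem.List.len (PySem.List.pyGetD (PySem.List.pyGetD (tick4d^[k] space) 0 []) 0 []) + 2 := by rw [d3]; omega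
    have hx1 : x + ((k : Int) + 1) < PySem.List.len (PySem.List.pyGetD (PySem.List.pyGetD (PySem.List.pyGetD (tick4d^[k] space) 0 []) 0 []) 0 []) + 2 := by rw [d4]; omega
    refine ⟨⟨by omega, by omega, by omega, by omega, by omega, by omega, by omega, by omega⟩, ?_⟩
    rw [cell_tick (tick4d^[k] space) _ _ _ _ (by omega) hw1 (by omega) hz1 (by omega) hy1 (by omega) hx1]
    rw [ex, ey, ez, ew]
    rcases hrule with h3 | ⟨h2, hin⟩
    · rw [← hcnt]
      split_ifs <;> simp_all
    · have hval := (hmem x y z w).mp hin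
      rw [← hcnt]
      split_ifs <;> simp_all
  · rintro ⟨⟨h0w, h1w, h0z, h1z, h0y, h1y, h0x, h1x⟩, hc⟩
    have hw1 : w + ((k : Int) + 1) < PySem.List.len (tick4d^[k] space) + 2 := by rw [d1]; omega
    have hz1 : z + ((k : Int) + 1) < PySem.List.len (PySem.List.pyGetD (tick4d^[k] space) 0 []) + 2 := by rw [d2]; omega
    have hy1 : y + ((k : Int) + 1) < PySem.List.len (PySem.List.pyGetD (PySem.List.pyGetD (tick4d^[k] space) 0 []) 0 []) + 2 := by rw [d3]; omega
    have hx1 : x + ((k : Int) + 1) < PySem.List.len (PySem.List.pyGetD (PySem.List.pyGetD (PySem.List.pyGetD (tick4d^[k] space) 0 []) 0 []) 0 []) + 2 := by rw [d4]; omega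
    rw [cell_tick (tick4d^[k] space) _ _ _ _ (by omega) hw1 (by omega) hz1 (by omega) hy1 (by omega) hx1] at hc
    rw [ex, ey, ez, ew] at hc
    refine ⟨by omega, by omega, by omega, by omega, ?_⟩
    rw [← hcnt] at hc
    split_ifs at hc with hif hif3
    · exact Or.inr ⟨hif.2.2, (hmem x y z w).mpr ⟨hif.1, hif.2.1⟩⟩
    · exact Or.inl hif3
    · simp at hc

-- ===== A's final counting pass equals the length of enumActive =====
theorem len_flatMap_int {α β : Type} (l : List α) (f : α → List β) :
    (((l.flatMap f).length : Nat) : Int) = (l.map (fun a => (((f a).length : Nat) : Int))).sum := by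
  rw [List.length_flatMap, Nat.cast_list_sum, List.map_map]
  rfl

theorem sum_map_enumerate {α : Type} (l : List α) (F : α → Int) : ∀ s : Int,
    ((PySem.List.enumerate l s).map (fun p => F p.2)).sum = (l.map F).sum := by
  induction l with
  | nil => intro s; simp [PySem.List.enumerate_nil]
  | cons a l ih => intro s; rw [PySem.List.enumerate_cons]; simp [ih]

theorem countA_eq_enum (fin : List (List (List (List String)))) :
    (PySem.List.pyRange 0 (PySem.List.len fin)).foldl (fun res w =>
      (PySem.List.pyRange 0 (PySem.List.len (PySem.List.pyGetD fin w []))).foldl (fun res z =>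
        (PySem.List.pyRange 0 (PySem.List.len (PySem.List.pyGetD (PySem.List.pyGetD fin w []) z []))).foldl (fun res y =>
          (PySem.List.pyRange 0 (PySem.List.len (PySem.List.pyGetD (PySem.List.pyGetD (PySem.List.pyGetD fin w []) z []) y []))).foldl (fun res x =>
            if PySem.List.pyGetD (PySem.List.pyGetD (PySem.List.pyGetD (PySem.List.pyGetD fin w []) z []) y []) x "" = "#" then res + 1
            else res) res) res) res) (0 : Int) = ((enumActive fin).length : Int) := by
  -- A's index loops, level by level, become structural sums
  have e1 : ∀ (r : List String) (res : Int),
      (PySem.List.pyRange 0 (PySem.List.len r)).foldl (fun res x =>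
        if PySem.List.pyGetD r x "" = "#" then res + 1 else res) res
      = res + (r.map (fun c => if c = "#" then (1 : Int) else 0)).sum := fun r res =>
    (PySem.List.foldl_pyRange_zero_pyGetD r "" (fun res c => if c = "#" then res + 1 else res) res).trans
      (foldl_plus _ _ _ _ (fun res c => by split_ifs <;> ring))
  have e2 : ∀ (d : List (List String)) (res : Int),
      (PySem.List.pyRange 0 (PySem.List.len d)).foldl (fun res y =>
        (PySem.List.pyRange 0 (PySem.List.len (PySem.List.pyGetD d y []))).foldl (fun res x =>
          if PySem.List.pyGetD (PySem.List.pyGetD d y []) x "" = "#" then res + 1 else res) res) res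
      = res + (d.map (fun r => (r.map (fun c => if c = "#" then (1 : Int) else 0)).sum)).sum := fun d res =>
    (PySem.List.foldl_pyRange_zero_pyGetD d []
      (fun res r => (PySem.List.pyRange 0 (PySem.List.len r)).foldl (fun res x =>
        if PySem.List.pyGetD r x "" = "#" then res + 1 else res) res) res).trans
      (foldl_plus _ _ _ _ (fun res r => e1 r res))
  have e3 : ∀ (g : List (List (List String))) (res : Int),
      (PySem.List.pyRange 0 (PySem.List.len g)).foldl (fun res z =>
        (PySem.List.pyRange 0 (PySem.List.len (PySem.List.pyGetD g z []))).foldl (fun res y =>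
          (PySem.List.pyRange 0 (PySem.List.len (PySem.List.pyGetD (PySem.List.pyGetD g z []) y []))).foldl (fun res x =>
            if PySem.List.pyGetD (PySem.List.pyGetD (PySem.List.pyGetD g z []) y []) x "" = "#" then res + 1 else res) res) res) res
      = res + (g.map (fun d => (d.map (fun r => (r.map (fun c => if c = "#" then (1 : Int) else 0)).sum)).sum)).sum := fun g res =>
    (PySem.List.foldl_pyRange_zero_pyGetD g []
      (fun res d => (PySem.List.pyRange 0 (PySem.List.len d)).foldl (fun res y =>
        (PySem.List.pyRange 0 (PySem.List.len (PySem.List.pyGetD d y []))).foldl (fun res x =>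
          if PySem.List.pyGetD (PySem.List.pyGetD d y []) x "" = "#" then res + 1 else res) res) res) res).trans
      (foldl_plus _ _ _ _ (fun res d => e2 d res))
  have e4 :
      (PySem.List.pyRange 0 (PySem.List.len fin)).foldl (fun res w =>
        (PySem.List.pyRange 0 (PySem.List.len (PySem.List.pyGetD fin w []))).foldl (fun res z =>
          (PySem.List.pyRange 0 (PySem.List.len (PySem.List.pyGetD (PySem.List.pyGetD fin w []) z []))).foldl (fun res y =>
            (PySem.List.pyRange 0 (PySem.List.len (PySem.List.pyGetD (PySem.List.pyGetD (PySem.List.pyGetD fin w []) z []) y []))).foldl (fun res x =>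
              if PySem.List.pyGetD (PySem.List.pyGetD (PySem.List.pyGetD (PySem.List.pyGetD fin w []) z []) y []) x "" = "#" then res + 1
              else res) res) res) res) (0 : Int)
      = 0 + (fin.map (fun g => (g.map (fun d => (d.map (fun r => (r.map (fun c => if c = "#" then (1 : Int) else 0)).sum)).sum)).sum)).sum :=
    (PySem.List.foldl_pyRange_zero_pyGetD fin []
      (fun res g => (PySem.List.pyRange 0 (PySem.List.len g)).foldl (fun res z =>
        (PySem.List.pyRange 0 (PySem.List.len (PySem.List.pyGetD g z []))).foldl (fun res y =>
          (PySem.List.pyRange 0 (PySem.List.len (PySem.List.pyGetD (PySem.List.pyGetD g z []) y []))).foldl (fun res x =>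
            if PySem.List.pyGetD (PySem.List.pyGetD (PySem.List.pyGetD g z []) y []) x "" = "#" then res + 1 else res) res) res) res) 0).trans
      (foldl_plus _ _ _ _ (fun res g => e3 g res))
  rw [e4, zero_add]
  have l1 : ∀ (r : List String) (yk zk wk : Int), ∀ s : Int,
      ((((PySem.List.enumerate r s).filterMap (fun xc =>
          if xc.2 = "#" then some (xc.1, yk, zk, wk) else none)).length : Nat) : Int)
      = (r.map (fun c => if c = "#" then (1 : Int) else 0)).sum := by
    intro r yk zk wk
    induction r with
    | nil => intro s; simp [PySem.List.enumerate_nil]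
    | cons c r ih =>
      intro s
      rw [PySem.List.enumerate_cons]
      by_cases h : c = "#"
      · simp [h, ← ih (s + 1)]; omega
      · simp [h, ← ih (s + 1)]
  have l3 : ∀ (d : List (List String)) (zk wk : Int) (s : Int),
      ((((PySem.List.enumerate d s).flatMap (fun yr => (PySem.List.enumerate yr.2).filterMap (fun xc =>
          if xc.2 = "#" then some (xc.1, yr.1, zk, wk) else none))).length : Nat) : Int)
      = (d.map (fun r => (r.map (fun c => if c = "#" then (1 : Int) else 0)).sum)).sum := by
    intro d zk wk s
    rw [len_flatMap_int]
    exact (sum_map_congr (PySem.List.enumerate d s) _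
        (fun yr => (yr.2.map (fun c => if c = "#" then (1 : Int) else 0)).sum)
        (fun yr => l1 yr.2 yr.1 zk wk 0)).trans
      (sum_map_enumerate d (fun r => (r.map (fun c => if c = "#" then (1 : Int) else 0)).sum) s)
  have l2 : ∀ (g : List (List (List String))) (wk : Int) (s : Int),
      ((((PySem.List.enumerate g s).flatMap (fun zd => (PySem.List.enumerate zd.2).flatMap (fun yr =>
          (PySem.List.enumerate yr.2).filterMap (fun xc =>
            if xc.2 = "#" then some (xc.1, yr.1, zd.1, wk) else none)))).length : Nat) : Int)
      = (g.map (fun d => (d.map (fun r => (r.map (fun c => if c = "#" then (1 : Int) else 0)).sum)).sum)).sum := by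
    intro g wk s
    rw [len_flatMap_int]
    exact (sum_map_congr (PySem.List.enumerate g s) _
        (fun zd => (zd.2.map (fun r => (r.map (fun c => if c = "#" then (1 : Int) else 0)).sum)).sum)
        (fun zd => l3 zd.2 zd.1 wk 0)).trans
      (sum_map_enumerate g (fun d => (d.map (fun r => (r.map (fun c => if c = "#" then (1 : Int) else 0)).sum)).sum) s)
  rw [enumActive, len_flatMap_int]
  exact (sum_map_enumerate fin (fun g => (g.map (fun d => (d.map (fun r => (r.map (fun c => if c = "#" then (1 : Int) else 0)).sum)).sum)).sum) 0).symm.trans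
    (sum_map_congr (PySem.List.enumerate fin 0)
      (fun wg => (wg.2.map (fun d => (d.map (fun r => (r.map (fun c => if c = "#" then (1 : Int) else 0)).sum)).sum)).sum) _
      (fun wg => (l2 wg.2 wg.1 0).symm))

-- B's loop after k iterations, and that it maintains the invariant
def iterB (space : List (List (List (List String)))) (k : Nat) : PySem.Set (Int × Int × Int × Int) :=
  (PySem.List.pyRange 0 ((k : Nat) : Int)).foldl (fun active t => stepActive space t active) (initActive space)

theorem iterB_inv (space : List (List (List (List String)))) : ∀ k : Nat, Inv4 space k (iterB space k) := by
  intro k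
  induction k with
  | zero =>
    rw [iterB, Nat.cast_zero, PySem.List.pyRange_one_eq_nil (le_refl 0)]
    exact inv_init space
  | succ k ih =>
    have hstep : iterB space (k + 1) = stepActive space ((k : Nat) : Int) (iterB space k) := by
      rw [iterB, iterB]
      push_cast
      rw [PySem.List.pyRange_one_succ_right (by positivity), List.foldl_append]
      simp
    rw [hstep]
    exact inv_step space k _ ih

theorem final_count (space : List (List (List (List String)))) (k : Nat)
    (active : PySem.Set (Int × Int × Int × Int)) (h : Inv4 space k active) :
    ((enumActive (tick4d^[k] space)).length : Int) = PySem.Set.len active := by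
  obtain ⟨hnd, hmem⟩ := h
  have hperm : (active.map (fun c : Int × Int × Int × Int =>
      (c.1 + (k : Int), c.2.1 + (k : Int), c.2.2.1 + (k : Int), c.2.2.2 + (k : Int)))).Perm
      (enumActive (tick4d^[k] space)) := by
    apply (List.perm_ext_iff_of_nodup ?_ (nodup_enumActive _)).mpr
    · intro m
      obtain ⟨m1, m2, m3, m4⟩ := m
      rw [mem_enumActive]
      simp only [List.mem_map]
      constructor
      · rintro ⟨⟨c1, c2, c3, c4⟩, hc, he⟩
        simp only [Prod.mk.injEq] at he
        obtain ⟨e1, e2, e3, e4⟩ := he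
        subst e1; subst e2; subst e3; subst e4
        exact (hmem c1 c2 c3 c4).mp hc
      · intro hvc
        refine ⟨(m1 - (k : Int), m2 - (k : Int), m3 - (k : Int), m4 - (k : Int)), ?_, ?_⟩
        · apply (hmem _ _ _ _).mpr
          have e1 : m1 - (k : Int) + (k : Int) = m1 := by ring
          have e2 : m2 - (k : Int) + (k : Int) = m2 := by ring
          have e3 : m3 - (k : Int) + (k : Int) = m3 := by ring
          have e4 : m4 - (k : Int) + (k : Int) = m4 := by ring
          rw [e1, e2, e3, e4]
          exact hvc
        · simp only [Prod.mk.injEq]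
          refine ⟨by ring, by ring, by ring, by ring⟩
    · refine List.Nodup.map ?_ hnd
      intro c c' h
      obtain ⟨c1, c2, c3, c4⟩ := c
      obtain ⟨e1, e2, e3, e4⟩ := c'
      simp only [Prod.mk.injEq] at h ⊢
      omega
  have hl := hperm.length_eq
  rw [List.length_map] at hl
  unfold PySem.Set.len
  exact_mod_cast hl.symm

theorem foldl_const {α β : Type} (f : α → α) (l : List β) (a : α) :
    l.foldl (fun x _ => f x) a = f^[l.length] a := by
  induction l generalizing a with
  | nil => rfl
  | cons b l ih => simp [List.foldl_cons, ih, Function.iterate_succ_apply]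

theorem pyRange_toNat (ticks : Int) :
    PySem.List.pyRange 0 ticks = PySem.List.pyRange 0 ((ticks.toNat : Nat) : Int) := by
  by_cases h : 0 < ticks
  · rw [Int.toNat_of_nonneg (by omega)]
  · rw [PySem.List.pyRange_one_eq_nil (by omega), PySem.List.pyRange_one_eq_nil (by omega)]

-- ===== VERDICT =====
theorem elapse_4d_spec : Claim_equal_elapse_4d := by
  intro space ticks _ _
  simp only [Spec_elapse_4d, elapse_4d, elapse_4d_alt]
  rw [pyRange_toNat ticks]
  have hA : (PySem.List.pyRange 0 ((ticks.toNat : Nat) : Int)).foldl (fun sp _ => tick4d sp) space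
      = tick4d^[ticks.toNat] space :=
    (foldl_const tick4d _ _).trans (by rw [PySem.List.length_pyRange_one, sub_zero, Int.toNat_natCast])
  rw [hA, countA_eq_enum (tick4d^[ticks.toNat] space)]
  exact final_count space ticks.toNat _ (iterB_inv space ticks.toNat)
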